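-- pv_equiv track=rewrite | github.com/yhc29/elii_api | Query/query.py | date_sort_filter
-- ===== SOURCE A (Python) =====
-- def date_sort_filter(date_list,query_period):
--   result = []
--   date_list = sorted(date_list)
--   if not query_period:
--     return date_list
--
--   for date in date_list:
--     if date>=query_period[0] and date<=query_period[1]:
--       result.append(date)
--     elif date>query_period[1]:
--       break
--   return result
-- ===== SOURCE B (Python) =====
-- import bisect
--
-- def date_sort_filter(date_list, query_period):
--     out = sorted(date_list)
--     if not query_period or not out:
--         return out
--     lo = bisect.bisect_left(out, query_period[0])
--     hi = bisect.bisect_right(out, query_period[1])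
--     return out[lo:hi]
-- ===== Notes on version B (the rewrite author's own statement) =====
-- stated objective: idiomatic
-- what changed: The linear scan with conditional append and early break over the sorted list is replaced by two binary searches (bisect_left/bisect_right) and a slice of the sorted list; on an empty list there is nothing to filter so B returns it directly.
import Mathlib
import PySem

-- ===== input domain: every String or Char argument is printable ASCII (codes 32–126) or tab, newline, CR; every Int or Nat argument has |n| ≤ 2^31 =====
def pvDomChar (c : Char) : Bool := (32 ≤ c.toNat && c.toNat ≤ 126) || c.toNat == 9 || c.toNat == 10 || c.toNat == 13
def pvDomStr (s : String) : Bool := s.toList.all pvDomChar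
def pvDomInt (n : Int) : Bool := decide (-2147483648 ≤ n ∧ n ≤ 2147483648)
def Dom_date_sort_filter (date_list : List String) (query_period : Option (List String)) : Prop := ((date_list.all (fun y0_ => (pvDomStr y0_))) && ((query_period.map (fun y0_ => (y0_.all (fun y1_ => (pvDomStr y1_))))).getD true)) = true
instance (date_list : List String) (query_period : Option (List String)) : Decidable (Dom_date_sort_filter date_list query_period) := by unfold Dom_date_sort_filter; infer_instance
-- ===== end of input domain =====

-- B replaces A's linear scan (conditional append + early break) over the sorted list by two
-- binary searches (bisect_left / bisect_right) and a slice of the sorted list (idiomatic).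

-- ===== PORT A =====
-- the for-loop of A: append when q0 ≤ d ≤ q1, break when d > q1
def pvALoop (q0 q1 : String) (acc : List String) : List String → List String
  | [] => acc
  | d :: rest =>
      if q0 ≤ d ∧ d ≤ q1 then pvALoop q0 q1 (acc ++ [d]) rest
      else if q1 < d then acc
      else pvALoop q0 q1 acc rest

def date_sort_filter (date_list : List String) (query_period : Option (List String)) : List String :=
  let dl := PySem.List.sorted date_list (fun x => x)
  match query_period with
  | none => dl
  | some q =>
    if q = [] then dl
    else pvALoop (PySem.List.pyGetD q 0 "") (PySem.List.pyGetD q 1 "") [] dl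

-- ===== PORT B =====
def date_sort_filter_alt (date_list : List String) (query_period : Option (List String)) : List String :=
  let out := PySem.List.sorted date_list (fun x => x)
  match query_period with
  | none => out
  | some q =>
    if q = [] then out
    else if out = [] then out
    else
      let lo := PySem.List.bisectLeft out (PySem.List.pyGetD q 0 "")
      let hi := PySem.List.bisectRight out (PySem.List.pyGetD q 1 "")
      PySem.List.slice out (some (lo : Int)) (some (hi : Int))

-- ===== PRECONDITION & SPEC =====
-- Pre_ excludes exactly the inputs on which A raises: a nonempty date_list together with a
-- truthy one-element query_period, where A's query_period[1] access raises IndexError (B's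
-- equally-unconditional query_period[1] access raises there too).
def Pre_date_sort_filter (date_list : List String) (query_period : Option (List String)) : Prop :=
  date_list = [] ∨ (query_period.getD []).length ≠ 1
instance (date_list : List String) (query_period : Option (List String)) : Decidable (Pre_date_sort_filter date_list query_period) := by unfold Pre_date_sort_filter; infer_instance

def pvWitness_date_sort_filter : List String × Option (List String) := (["b", "a", "c"], some ["a", "b"])

def Spec_date_sort_filter (date_list : List String) (query_period : Option (List String)) (out : List String) : Prop := out = date_sort_filter_alt date_list query_period
instance (date_list : List String) (query_period : Option (List String)) (out : List String) : Decidable (Spec_date_sort_filter date_list query_period out) := by unfold Spec_date_sort_filter; infer_instance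

-- ===== CLAIM (what is proved, stated in full; the proofs are below) =====
def Claim_equal_date_sort_filter : Prop := ∀ (date_list : List String) (query_period : Option (List String)), Dom_date_sort_filter date_list query_period → Pre_date_sort_filter date_list query_period → Spec_date_sort_filter date_list query_period (date_sort_filter date_list query_period)

-- ===== LEMMAS AND PROOFS =====

theorem pvWitness_ok : Dom_date_sort_filter pvWitness_date_sort_filter.1 pvWitness_date_sort_filter.2 ∧ Pre_date_sort_filter pvWitness_date_sort_filter.1 pvWitness_date_sort_filter.2 := by decide

-- A's loop with accumulator prepends the accumulator
theorem pvALoop_acc (q0 q1 : String) (acc : List String) (l : List String) :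
    pvALoop q0 q1 acc l = acc ++ pvALoop q0 q1 [] l := by
  induction l generalizing acc with
  | nil => simp [pvALoop]
  | cons d rest ih =>
    by_cases h1 : q0 ≤ d ∧ d ≤ q1
    · rw [pvALoop, pvALoop, if_pos h1, if_pos h1, ih (acc ++ [d]), ih ([] ++ [d])]
      simp
    · by_cases h2 : q1 < d
      · rw [pvALoop, pvALoop, if_neg h1, if_neg h1, if_pos h2, if_pos h2]
        simp
      · rw [pvALoop, pvALoop, if_neg h1, if_neg h1, if_neg h2, if_neg h2, ih acc]

-- On a ≤-sorted list, A's loop with break computes the filter over the whole list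
theorem pvALoop_filter (q0 q1 : String) (l : List String)
    (hs : List.Pairwise (· ≤ ·) l) :
    pvALoop q0 q1 [] l = l.filter (fun d => decide (q0 ≤ d) && decide (d ≤ q1)) := by
  induction l with
  | nil => simp [pvALoop]
  | cons d rest ih =>
    have hrest := (List.pairwise_cons.mp hs).2
    have hd := (List.pairwise_cons.mp hs).1
    by_cases h1 : q0 ≤ d ∧ d ≤ q1
    · rw [pvALoop, if_pos h1, pvALoop_acc, ih hrest, List.filter_cons,
        if_pos (by simp [h1.1, h1.2])]
      rfl
    · by_cases h2 : q1 < d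
      · rw [pvALoop, if_neg h1, if_pos h2]
        have : ∀ y ∈ d :: rest, ¬ (decide (q0 ≤ y) && decide (y ≤ q1)) = true := by
          intro y hy
          rcases List.mem_cons.mp hy with h | h
          · subst h
            simp only [Bool.and_eq_true, decide_eq_true_eq, not_and]
            intro _ hle
            exact absurd hle (not_le.mpr h2)
          · have hq : q1 < y := lt_of_lt_of_le h2 (hd y h)
            simp only [Bool.and_eq_true, decide_eq_true_eq, not_and]
            intro _ hle
            exact absurd hle (not_le.mpr hq)
        rw [List.filter_eq_nil_iff.mpr this]
      · have hlt : d < q0 := by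
          rcases not_and_or.mp h1 with h | h
          · exact not_le.mp h
          · exact absurd (not_lt.mp h2) h
        rw [pvALoop, if_neg h1, if_neg h2, ih hrest, List.filter_cons,
          if_neg (by
            simp only [Bool.and_eq_true, decide_eq_true_eq, not_and]
            intro hle
            exact absurd hle (not_le.mpr hlt))]

-- binary-search invariant for bisect_left's loop, at type String
theorem pvBisectLeftLoop_spec (xs : List String) (x : String)
    (hs : List.Pairwise (· ≤ ·) xs) :
    ∀ fuel lo hi, lo ≤ hi → hi ≤ xs.length → hi - lo ≤ fuel →
    (∀ j (hj : j < xs.length), j < lo → xs[j] < x) →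
    (∀ j (hj : j < xs.length), hi ≤ j → x ≤ xs[j]) →
    (∀ j (hj : j < xs.length), j < PySem.List.bisectLeftLoop xs x fuel lo hi → xs[j] < x) ∧
    (∀ j (hj : j < xs.length), PySem.List.bisectLeftLoop xs x fuel lo hi ≤ j → x ≤ xs[j]) ∧
    PySem.List.bisectLeftLoop xs x fuel lo hi ≤ hi := by
  intro fuel
  induction fuel with
  | zero =>
    intro lo hi hlohi hhi hfuel hlow hhigh
    have : lo = hi := by omega
    subst this
    exact ⟨hlow, hhigh, le_refl _⟩
  | succ fuel ih =>
    intro lo hi hlohi hhi hfuel hlow hhigh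
    rw [PySem.List.bisectLeftLoop]
    by_cases hlt : lo < hi
    · rw [if_pos hlt]
      have hmid : (lo + hi) / 2 < xs.length := by omega
      rw [List.getElem?_eq_getElem hmid]
      by_cases hy : xs[(lo + hi) / 2] < x
      · simp only [if_pos hy]
        obtain ⟨a, b, c⟩ := ih ((lo + hi) / 2 + 1) hi (by omega) hhi (by omega)
          (by
            intro j hj hjlt
            rcases Nat.lt_succ_iff_lt_or_eq.mp hjlt with h | h
            · exact lt_of_le_of_lt (List.pairwise_iff_getElem.mp hs j _ hj hmid h) hy
            · subst h; exact hy)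
          hhigh
        exact ⟨a, b, c⟩
      · simp only [if_neg hy]
        obtain ⟨a, b, c⟩ := ih lo ((lo + hi) / 2) (by omega) (by omega) (by omega) hlow
          (by
            intro j hj hjge
            have hx : x ≤ xs[(lo + hi) / 2] := not_lt.mp hy
            rcases Nat.lt_or_ge ((lo + hi) / 2) j with h | h
            · exact le_trans hx (List.pairwise_iff_getElem.mp hs _ j hmid hj h)
            · have : j = (lo + hi) / 2 := by omega
              subst this; exact hx)
        exact ⟨a, b, le_trans c (by omega)⟩
    · rw [if_neg hlt]
      have : lo = hi := by omega
      subst this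
      exact ⟨hlow, hhigh, le_refl _⟩

-- binary-search invariant for bisect_right's loop, at type String
theorem pvBisectRightLoop_spec (xs : List String) (x : String)
    (hs : List.Pairwise (· ≤ ·) xs) :
    ∀ fuel lo hi, lo ≤ hi → hi ≤ xs.length → hi - lo ≤ fuel →
    (∀ j (hj : j < xs.length), j < lo → xs[j] ≤ x) →
    (∀ j (hj : j < xs.length), hi ≤ j → x < xs[j]) →
    (∀ j (hj : j < xs.length), j < PySem.List.bisectRightLoop xs x fuel lo hi → xs[j] ≤ x) ∧
    (∀ j (hj : j < xs.length), PySem.List.bisectRightLoop xs x fuel lo hi ≤ j → x < xs[j]) ∧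
    PySem.List.bisectRightLoop xs x fuel lo hi ≤ xs.length := by
  intro fuel
  induction fuel with
  | zero =>
    intro lo hi hlohi hhi hfuel hlow hhigh
    have : lo = hi := by omega
    subst this
    exact ⟨hlow, hhigh, hhi⟩
  | succ fuel ih =>
    intro lo hi hlohi hhi hfuel hlow hhigh
    rw [PySem.List.bisectRightLoop]
    by_cases hlt : lo < hi
    · rw [if_pos hlt]
      have hmid : (lo + hi) / 2 < xs.length := by omega
      rw [List.getElem?_eq_getElem hmid]
      by_cases hy : x < xs[(lo + hi) / 2]
      · simp only [if_pos hy]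
        exact ih lo ((lo + hi) / 2) (by omega) (by omega) (by omega) hlow
          (by
            intro j hj hjge
            rcases Nat.lt_or_ge ((lo + hi) / 2) j with h | h
            · exact lt_of_lt_of_le hy (List.pairwise_iff_getElem.mp hs _ j hmid hj h)
            · have : j = (lo + hi) / 2 := by omega
              subst this; exact hy)
      · simp only [if_neg hy]
        exact ih ((lo + hi) / 2 + 1) hi (by omega) hhi (by omega)
          (by
            intro j hj hjlt
            have hx : xs[(lo + hi) / 2] ≤ x := not_lt.mp hy
            rcases Nat.lt_succ_iff_lt_or_eq.mp hjlt with h | h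
            · exact le_trans (List.pairwise_iff_getElem.mp hs j _ hj hmid h) hx
            · subst h; exact hx)
          hhigh
    · rw [if_neg hlt]
      have : lo = hi := by omega
      subst this
      exact ⟨hlow, hhigh, hhi⟩

-- the slice of the sorted list between the two bisection points is the filter
theorem pvSlice_filter (s : List String) (q0 q1 : String)
    (hs : List.Pairwise (· ≤ ·) s) :
    PySem.List.slice s (some ((PySem.List.bisectLeft s q0 : Nat) : Int))
        (some ((PySem.List.bisectRight s q1 : Nat) : Int)) =
      s.filter (fun d => decide (q0 ≤ d) && decide (d ≤ q1)) := by
  obtain ⟨hL1, hL2, hLle⟩ :=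
    pvBisectLeftLoop_spec s q0 hs s.length 0 s.length (by omega) (le_refl _) (by omega)
      (by intro j hj h; omega) (by intro j hj h; omega)
  obtain ⟨hR1, hR2, hRle⟩ :=
    pvBisectRightLoop_spec s q1 hs s.length 0 s.length (by omega) (le_refl _) (by omega)
      (by intro j hj h; omega) (by intro j hj h; omega)
  have hLdef : PySem.List.bisectLeft s q0 = PySem.List.bisectLeftLoop s q0 s.length 0 s.length := rfl
  have hRdef : PySem.List.bisectRight s q1 = PySem.List.bisectRightLoop s q1 s.length 0 s.length := rfl
  rw [PySem.List.slice_natCast, hLdef, hRdef]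
  set L := PySem.List.bisectLeftLoop s q0 s.length 0 s.length with hL
  set R := PySem.List.bisectRightLoop s q1 s.length 0 s.length with hR
  by_cases hLR : R ≤ L
  · have h0 : R - L = 0 := by omega
    rw [h0, List.take_zero]
    symm
    rw [List.filter_eq_nil_iff]
    intro a ha
    obtain ⟨j, hj, rfl⟩ := List.mem_iff_getElem.mp ha
    simp only [Bool.and_eq_true, decide_eq_true_eq, not_and]
    intro hle1 hle2
    by_cases hjR : j < R
    · exact absurd hle1 (not_le.mpr (hL1 j hj (by omega)))
    · exact absurd hle2 (not_le.mpr (hR2 j hj (by omega)))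
  · rw [Nat.not_le] at hLR
    have hsplit : s = s.take L ++ ((s.drop L).take (R - L) ++ s.drop R) := by
      conv_lhs => rw [← List.take_append_drop L s]
      congr 1
      conv_lhs => rw [← List.take_append_drop (R - L) (s.drop L)]
      rw [List.drop_drop]
      congr 2
      omega
    conv_rhs => rw [hsplit]
    rw [List.filter_append, List.filter_append]
    have hpre : (s.take L).filter (fun d => decide (q0 ≤ d) && decide (d ≤ q1)) = [] := by
      rw [List.filter_eq_nil_iff]
      intro a ha
      obtain ⟨k, hk, rfl⟩ := List.mem_iff_getElem.mp ha
      rw [List.length_take] at hk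
      have hk' : k < L := by omega
      rw [List.getElem_take]
      have h := hL1 k (by omega) hk'
      simp only [Bool.and_eq_true, decide_eq_true_eq, not_and]
      intro hle _
      exact absurd hle (not_le.mpr h)
    have hsuf : (s.drop R).filter (fun d => decide (q0 ≤ d) && decide (d ≤ q1)) = [] := by
      rw [List.filter_eq_nil_iff]
      intro a ha
      obtain ⟨k, hk, rfl⟩ := List.mem_iff_getElem.mp ha
      rw [List.getElem_drop]
      have hk' : R + k < s.length := by
        have := List.length_drop (l := s) (i := R)
        omega
      have h := hR2 (R + k) hk' (by omega)
      simp only [Bool.and_eq_true, decide_eq_true_eq, not_and]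
      intro _ hle
      exact absurd hle (not_le.mpr h)
    have hmid : ((s.drop L).take (R - L)).filter (fun d => decide (q0 ≤ d) && decide (d ≤ q1))
        = (s.drop L).take (R - L) := by
      rw [List.filter_eq_self]
      intro a ha
      obtain ⟨k, hk, rfl⟩ := List.mem_iff_getElem.mp ha
      rw [List.length_take, List.length_drop] at hk
      have hk1 : k < R - L := by omega
      have hk2 : L + k < s.length := by omega
      rw [List.getElem_take, List.getElem_drop]
      have hlo := hL2 (L + k) hk2 (by omega)
      have hhi := hR1 (L + k) hk2 (by omega)
      simp only [Bool.and_eq_true, decide_eq_true_eq]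
      exact ⟨hlo, hhi⟩
    rw [hpre, hsuf, hmid, List.nil_append, List.append_nil]

-- ===== VERDICT (by name: the statement is the Claim_ definition above) =====
theorem date_sort_filter_spec : Claim_equal_date_sort_filter := by
  intro dl qp hdom hpre
  unfold Spec_date_sort_filter date_sort_filter date_sort_filter_alt
  cases qp with
  | none => rfl
  | some q =>
    by_cases hq : q = []
    · simp [hq]
    · simp only [if_neg hq]
      by_cases hout : PySem.List.sorted dl (fun x => x) = []
      · simp [hout, pvALoop]
      · simp only [if_neg hout]
        have hs : List.Pairwise (· ≤ ·) (PySem.List.sorted dl (fun x => x)) :=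
          PySem.List.sorted_pairwise dl _
        rw [pvALoop_filter _ _ _ hs, pvSlice_filter _ _ _ hs]
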